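-- pv_equiv track=rewrite | github.com/The404Studios/Archimation | ai-control/cortex/trust_translate.py | api_band_to_kernel_score
-- ===== SOURCE A (Python) =====
-- from typing import Final
--
-- API_BAND_MIN: Final[int] = 0
--
-- API_BAND_MAX: Final[int] = 1000
--
-- API_BAND_TO_KERNEL_FLOOR: Final[dict[int, int]] = {
--     0:    -1000,
--     100:   -200,
--     200:      0,
--     300:    150,
--     400:    300,
--     500:    500,
--     600:    700,
--     700:    800,
--     800:    900,
--     900:   1000,
--     1000:  1000,
-- }
--
-- _BANDS_SORTED: Final[tuple[int, ...]] = tuple(sorted(API_BAND_TO_KERNEL_FLOOR))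
--
-- def _clamp(value: int, lo: int, hi: int) -> int:
--     """Clamp an ``int`` into ``[lo, hi]`` inclusive."""
--     if value < lo:
--         return lo
--     if value > hi:
--         return hi
--     return value
--
-- def _require_int(name: str, value: object) -> int:
--     """Reject non-integer inputs with a ``TypeError``.
--
--     Accepts ``bool`` grudgingly (it is an ``int`` subclass in Python) but
--     rejects ``float`` because silent truncation is how Session 41's bugs
--     started in the first place.
--     """
--     if isinstance(value, bool):
--         # bool is int, but we want a clear-cut integer caller.
--         return int(value)
--     if isinstance(value, int):
--         return value
--     raise TypeError(
--         f"trust_translate: {name!r} must be int, got {type(value).__name__}"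
--     )
--
-- def api_band_to_kernel_score(band: int) -> int:
--     """Return the minimum kernel trust score required to satisfy ``band``.
--
--     Args:
--         band: API band value.  Must be an integer.  Negative values clamp
--             to ``0``; values above ``1000`` clamp to ``1000``; values
--             between defined anchors are resolved by walking down to the
--             nearest defined anchor (i.e. the floor of the containing band).
--
--     Returns:
--         Kernel trust score floor in ``[KERNEL_SCORE_MIN, KERNEL_SCORE_MAX]``.
--
--     Raises:
--         TypeError: if ``band`` is not an integer.
--     """
--     band_i = _require_int("band", band)
--     band_i = _clamp(band_i, API_BAND_MIN, API_BAND_MAX)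
--
--     # Exact hit.
--     if band_i in API_BAND_TO_KERNEL_FLOOR:
--         return API_BAND_TO_KERNEL_FLOOR[band_i]
--
--     # Off-anchor band (e.g. 250): floor to the largest defined band
--     # that is <= band_i.  Monotonic by construction.
--     floor_band = API_BAND_MIN
--     for anchor in _BANDS_SORTED:
--         if anchor <= band_i:
--             floor_band = anchor
--         else:
--             break
--     return API_BAND_TO_KERNEL_FLOOR[floor_band]
-- ===== SOURCE B (Python) =====
-- import bisect
-- from typing import Final
--
-- API_BAND_MIN: Final[int] = 0
-- API_BAND_MAX: Final[int] = 1000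
--
-- API_BAND_TO_KERNEL_FLOOR: Final[dict[int, int]] = {
--     0:    -1000,
--     100:   -200,
--     200:      0,
--     300:    150,
--     400:    300,
--     500:    500,
--     600:    700,
--     700:    800,
--     800:    900,
--     900:   1000,
--     1000:  1000,
-- }
--
-- _BANDS_SORTED: Final[tuple[int, ...]] = tuple(sorted(API_BAND_TO_KERNEL_FLOOR))
--
-- def _clamp(value: int, lo: int, hi: int) -> int:
--     if value < lo:
--         return lo
--     if value > hi:
--         return hi
--     return value
--
-- def _require_int(name: str, value: object) -> int:
--     if isinstance(value, bool):
--         return int(value)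
--     if isinstance(value, int):
--         return value
--     raise TypeError(
--         f"trust_translate: {name!r} must be int, got {type(value).__name__}"
--     )
--
-- def api_band_to_kernel_score(band: int) -> int:
--     band_i = _require_int("band", band)
--     band_i = _clamp(band_i, API_BAND_MIN, API_BAND_MAX)
--     # Binary search: largest anchor <= band_i (exact hits map to themselves).
--     idx = bisect.bisect_right(_BANDS_SORTED, band_i) - 1
--     return API_BAND_TO_KERNEL_FLOOR[_BANDS_SORTED[idx]]
-- ===== Notes on version B (the rewrite author's own statement) =====
-- stated objective: idiomatic
-- what changed: Replaced the exact-hit dict check plus linear walk-with-break over the sorted anchors by a single bisect_right binary search that finds the largest anchor <= the clamped band.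
import Mathlib
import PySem

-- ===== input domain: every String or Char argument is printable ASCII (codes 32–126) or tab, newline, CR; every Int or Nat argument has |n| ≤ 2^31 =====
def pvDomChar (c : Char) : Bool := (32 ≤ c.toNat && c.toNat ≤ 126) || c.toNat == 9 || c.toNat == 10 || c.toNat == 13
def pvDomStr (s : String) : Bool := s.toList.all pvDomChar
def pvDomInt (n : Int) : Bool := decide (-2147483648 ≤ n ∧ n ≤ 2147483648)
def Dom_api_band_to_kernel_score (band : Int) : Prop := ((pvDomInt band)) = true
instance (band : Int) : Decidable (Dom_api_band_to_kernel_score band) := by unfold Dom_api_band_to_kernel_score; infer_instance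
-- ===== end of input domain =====

-- B replaces A's exact-hit dict check plus linear walk-with-break over the sorted anchors
-- by one bisect_right binary search finding the largest anchor <= the clamped band (idiomatic).

-- ===== PORT A =====
-- API_BAND_TO_KERNEL_FLOOR as a PySem.Dict (insertion order)
def floorDict : PySem.Dict Int Int :=
  PySem.Dict.ofList [(0, -1000), (100, -200), (200, 0), (300, 150), (400, 300),
    (500, 500), (600, 700), (700, 800), (800, 900), (900, 1000), (1000, 1000)]

-- _BANDS_SORTED (the dict's keys, sorted; written as the resulting literal)
def bandsSorted : List Int := [0, 100, 200, 300, 400, 500, 600, 700, 800, 900, 1000]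

-- _clamp
def pyClamp (value lo hi : Int) : Int :=
  if value < lo then lo else if value > hi then hi else value

-- the 'for anchor in _BANDS_SORTED: if anchor <= band_i: floor_band = anchor else: break' loop
def walkFloor : List Int → Int → Int → Int
  | [], _, fb => fb
  | a :: rest, c, fb => if a ≤ c then walkFloor rest c a else fb

-- body of A after clamping ('band_i in dict' check, then the walk; the final dict lookup
-- cannot miss since floor_band is always an anchor, so .getD 0 is that lookup exactly)
def aCore (c : Int) : Int :=
  match floorDict.get? c with
  | some v => v
  | none => (floorDict.get? (walkFloor bandsSorted c 0)).getD 0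

def api_band_to_kernel_score (band : Int) : Int :=
  -- _require_int is identity on an Int argument (the TypeError branch is unreachable here)
  aCore (pyClamp band 0 1000)

-- ===== PORT B =====
-- bisect.bisect_right (a stdlib call in Source B), ported as the standard binary search;
-- the fuel argument (xs.length bisection steps always suffice) only makes it structural
def bisectRight (xs : List Int) (x : Int) : Nat → Nat → Nat → Nat
  | 0, lo, _ => lo
  | fuel + 1, lo, hi =>
    if lo < hi then
      let mid := (lo + hi) / 2
      if xs.getD mid 0 ≤ x then bisectRight xs x fuel (mid + 1) hi
      else bisectRight xs x fuel lo mid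
    else lo

-- body of B after clamping: idx = bisect_right(bands, c) - 1; dict[bands[idx]]
def bCore (c : Int) : Int :=
  let idx := bisectRight bandsSorted c bandsSorted.length 0 bandsSorted.length - 1
  (floorDict.get? (bandsSorted.getD idx 0)).getD 0

def api_band_to_kernel_score_alt (band : Int) : Int :=
  bCore (pyClamp band 0 1000)

-- ===== PRECONDITION & SPEC =====
def Spec_api_band_to_kernel_score (band : Int) (out : Int) : Prop := out = api_band_to_kernel_score_alt band
instance (band : Int) (out : Int) : Decidable (Spec_api_band_to_kernel_score band out) := by unfold Spec_api_band_to_kernel_score; infer_instance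

-- ===== CLAIM (what is proved, stated in full; the proofs are below) =====
def Claim_equal_api_band_to_kernel_score : Prop := ∀ (band : Int), Dom_api_band_to_kernel_score band → Spec_api_band_to_kernel_score band (api_band_to_kernel_score band)

-- ===== LEMMAS AND PROOFS =====

-- the two loop bodies agree on every clamped value (a finite check over 0..1000)
set_option maxRecDepth 100000 in
theorem aCore_eq_bCore : ∀ n : Nat, n < 1001 → aCore (n : Int) = bCore (n : Int) := by decide

-- ===== VERDICT (by name: the statement is the Claim_ definition above) =====
theorem api_band_to_kernel_score_spec : Claim_equal_api_band_to_kernel_score := by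
  intro band _
  unfold Spec_api_band_to_kernel_score api_band_to_kernel_score api_band_to_kernel_score_alt
  have h0 : 0 ≤ pyClamp band 0 1000 ∧ pyClamp band 0 1000 ≤ 1000 := by
    unfold pyClamp; split_ifs <;> omega
  have hcast : ((pyClamp band 0 1000).toNat : Int) = pyClamp band 0 1000 := by omega
  rw [← hcast]
  exact aCore_eq_bCore _ (by omega)
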